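-- pv_equiv track=rewrite | github.com/titicplusplus/Build_order_display_sc2 | LotvToBo.py | newparserLotz
-- ===== SOURCE A (Python) =====
-- def isSpace(char):
--     return char == " " or char == "\t" or char == "\f" or char == "\v"
--
-- def getNextChar(line, k):
--     while k < len(line) and isSpace(line[k]):
--         k += 1
--     return k
--
-- def getNextSpace(line, k):
--     while k < len(line) and not isSpace(line[k]):
--         k += 1
--     return k
--
-- def newparserLotz(lotv):
--     parser = []
--     for line in lotv.split("\n"):
--         parser.append([])
--         k = 0
--         while k < len(line):
--             k  = getNextChar(line, k)
--             k1 = getNextSpace(line, k)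
--
--             parser[-1].append(line[k:k1])
--
--             k = k1
--     return parser
-- ===== SOURCE B (Python) =====
-- SPACE_CHARS = " \t\f\v"
--
-- def newparserLotz(lotv):
--     parser = []
--     for line in lotv.split("\n"):
--         # split the line on runs of whitespace, re.split-style: a single
--         # character pass keeping the parts; then drop a leading empty part
--         parts = [""]
--         prev_space = False
--         for ch in line:
--             if ch in SPACE_CHARS:
--                 if not prev_space:
--                     parts.append("")
--                 prev_space = True
--             else:
--                 parts[-1] += ch
--                 prev_space = False
--         parser.append(parts[1:] if parts[0] == "" else parts)
--     return parser
-- ===== Notes on version B (the rewrite author's own statement) =====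
-- stated objective: alternative
-- what changed: A tokenizes each line with an index-based while loop driven by two scanner helpers (getNextChar/getNextSpace) and slicing; B replaces all of that with a single character pass per line that keeps re.split-style parts (appending a new part at each whitespace-run boundary, growing the last part otherwise) and then drops a leading empty part, with no index arithmetic, no slicing and no helpers.
import Mathlib
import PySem

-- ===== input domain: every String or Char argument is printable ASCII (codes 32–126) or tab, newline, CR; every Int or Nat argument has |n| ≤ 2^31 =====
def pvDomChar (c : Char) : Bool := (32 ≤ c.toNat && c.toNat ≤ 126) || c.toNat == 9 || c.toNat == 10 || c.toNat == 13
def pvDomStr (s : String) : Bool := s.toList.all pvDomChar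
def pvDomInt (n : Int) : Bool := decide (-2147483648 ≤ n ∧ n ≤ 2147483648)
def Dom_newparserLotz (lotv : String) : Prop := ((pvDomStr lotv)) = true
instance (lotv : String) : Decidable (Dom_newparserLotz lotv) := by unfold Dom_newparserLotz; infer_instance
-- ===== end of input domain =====

-- B replaces A's index/scanner-helper tokenizer by a single character pass per line
-- (re.split-style parts plus dropping a leading empty part); same return value, same cost.

-- ===== PORT A =====
-- A's `isSpace`
def isSpaceP (c : Char) : Bool := c == ' ' || c == '\t' || c == '\x0c' || c == '\x0b'

-- A's `getNextChar` while-loop (indices are Nat: A only ever moves k from 0 upward)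
def getNextCharP (ln : List Char) (k : Nat) : Nat :=
  if h : k < ln.length then
    if isSpaceP (ln[k]) then getNextCharP ln (k + 1) else k
  else k
termination_by ln.length - k

-- A's `getNextSpace` while-loop
def getNextSpaceP (ln : List Char) (k : Nat) : Nat :=
  if h : k < ln.length then
    if isSpaceP (ln[k]) then k else getNextSpaceP ln (k + 1)
  else k
termination_by ln.length - k

-- the scanners never move k backwards (needed for termination of the while loop below)
theorem le_getNextCharP (ln : List Char) (k : Nat) : k ≤ getNextCharP ln k := by
  unfold getNextCharP
  split
  · split
    · have := le_getNextCharP ln (k + 1); omega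
    · exact le_refl k
  · exact le_refl k
termination_by ln.length - k

theorem le_getNextSpaceP (ln : List Char) (k : Nat) : k ≤ getNextSpaceP ln k := by
  unfold getNextSpaceP
  split
  · split
    · exact le_refl k
    · have := le_getNextSpaceP ln (k + 1); omega
  · exact le_refl k
termination_by ln.length - k

theorem lt_stepA (ln : List Char) (k : Nat) (h : k < ln.length) :
    k < getNextSpaceP ln (getNextCharP ln k) := by
  rw [getNextCharP]
  simp only [h, dif_pos]
  by_cases hs : isSpaceP (ln[k]) = true
  · simp only [hs, if_pos]
    have h1 := le_getNextCharP ln (k + 1)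
    have h2 := le_getNextSpaceP ln (getNextCharP ln (k + 1))
    omega
  · simp only [hs, if_neg, Bool.false_eq_true, not_false_eq_true]
    rw [getNextSpaceP]
    simp only [h, dif_pos, hs, if_neg, Bool.false_eq_true, not_false_eq_true]
    have := le_getNextSpaceP ln (k + 1)
    omega

-- A's inner `while k < len(line)` loop; the slice line[k:k1] (with 0 ≤ k ≤ k1 ≤ len)
-- is exactly take/drop on the char list.
def lineWhileA (ln : List Char) (k : Nat) (acc : List String) : List String :=
  if h : k < ln.length then
    let k' := getNextCharP ln k
    let k1 := getNextSpaceP ln k'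
    lineWhileA ln k1 (acc ++ [String.mk ((ln.drop k').take (k1 - k'))])
  else acc
termination_by ln.length - k
decreasing_by have := lt_stepA ln k h; omega

def newparserLotz (lotv : String) : List (List String) :=
  (PySem.Chars.splitOn lotv.toList "\n".toList).foldl
    (fun parser line => parser ++ [lineWhileA line 0 []]) []

-- ===== PORT B =====
-- Source B's SPACE_CHARS
def spaceCharsB : List Char := [' ', '\t', '\x0c', '\x0b']

-- Source B's inner for-loop body; the parts are built as char lists (Python's += on str)
def lineStepB (st : List (List Char) × Bool) (ch : Char) : List (List Char) × Bool :=
  if spaceCharsB.contains ch then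
    (if !st.2 then st.1 ++ [[]] else st.1, true)
  else
    (st.1.dropLast ++ [st.1.getLastD [] ++ [ch]], false)

-- one line of Source B: fold the char pass, then `parts[1:] if parts[0] == "" else parts`
def lineB (ln : List Char) : List String :=
  let parts := (ln.foldl lineStepB ([[]], false)).1
  (if parts.headD [] = [] then parts.drop 1 else parts).map String.mk

def newparserLotz_alt (lotv : String) : List (List String) :=
  (PySem.Chars.splitOn lotv.toList "\n".toList).map (fun line => lineB line)

-- ===== PRECONDITION & SPEC =====
def Spec_newparserLotz (lotv : String) (out : List (List String)) : Prop := out = newparserLotz_alt lotv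
instance (lotv : String) (out : List (List String)) : Decidable (Spec_newparserLotz lotv out) := by unfold Spec_newparserLotz; infer_instance

-- ===== CLAIM (what is proved, stated in full; the proofs are below) =====
def Claim_equal_newparserLotz : Prop := ∀ (lotv : String), Dom_newparserLotz lotv → Spec_newparserLotz lotv (newparserLotz lotv)

-- ===== LEMMAS AND PROOFS =====

-- reference tokenization of one line, run by run
def nsP (c : Char) : Bool := !isSpaceP c

def tokRef (l : List Char) : List (List Char) :=
  match l with
  | [] => []
  | c :: cs =>
    ((c :: cs).dropWhile isSpaceP).takeWhile nsP
      :: tokRef ((((c :: cs) : List Char).dropWhile isSpaceP).dropWhile nsP)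
termination_by l.length
decreasing_by
  by_cases hc : isSpaceP c = true
  · have h1 : (c :: cs).dropWhile isSpaceP = cs.dropWhile isSpaceP := by
      simp [List.dropWhile_cons, hc]
    rw [h1]
    have h2 := List.length_dropWhile_le nsP (cs.dropWhile isSpaceP)
    have h3 := List.length_dropWhile_le isSpaceP cs
    simp only [List.length_cons]; omega
  · have h1 : (c :: cs).dropWhile isSpaceP = c :: cs := by
      simp [List.dropWhile_cons, hc]
    have hns : nsP c = true := by simp [nsP, hc]
    rw [h1]
    have h2 : (c :: cs).dropWhile nsP = cs.dropWhile nsP := by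
      simp [List.dropWhile_cons, hns]
    rw [h2]
    have h3 := List.length_dropWhile_le nsP cs
    simp only [List.length_cons]; omega

theorem tokRef_nil : tokRef [] = [] := by rw [tokRef]

theorem tokRef_cons (c : Char) (t : List Char) :
    tokRef (c :: t)
      = ((c :: t).dropWhile isSpaceP).takeWhile nsP
          :: tokRef (((c :: t).dropWhile isSpaceP).dropWhile nsP) := by
  rw [tokRef]

theorem drop_length_takeWhile (p : Char → Bool) (s : List Char) :
    s.drop (s.takeWhile p).length = s.dropWhile p := by
  induction s with
  | nil => rfl
  | cons c t ih =>
    by_cases hc : p c = true <;> simp [List.takeWhile_cons, List.dropWhile_cons, hc, ih]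

theorem take_length_takeWhile (p : Char → Bool) (s : List Char) :
    s.take (s.takeWhile p).length = s.takeWhile p := by
  induction s with
  | nil => rfl
  | cons c t ih =>
    by_cases hc : p c = true <;> simp [List.takeWhile_cons, hc, ih]

theorem getNextCharP_eq (ln : List Char) (k : Nat) :
    getNextCharP ln k = k + ((ln.drop k).takeWhile isSpaceP).length := by
  unfold getNextCharP
  split
  · rename_i h
    rw [List.drop_eq_getElem_cons h]
    by_cases hs : isSpaceP (ln[k]) = true
    · simp only [hs, if_pos]
      rw [getNextCharP_eq ln (k + 1)]
      simp only [List.takeWhile_cons, hs, if_true, List.length_cons]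
      omega
    · simp [List.takeWhile_cons, hs]
  · rename_i h
    rw [List.drop_eq_nil_of_le (by omega)]
    simp
termination_by ln.length - k

theorem getNextSpaceP_eq (ln : List Char) (k : Nat) :
    getNextSpaceP ln k = k + ((ln.drop k).takeWhile nsP).length := by
  unfold getNextSpaceP
  split
  · rename_i h
    rw [List.drop_eq_getElem_cons h]
    by_cases hs : isSpaceP (ln[k]) = true
    · have hns : nsP ln[k] = false := by simp [nsP, hs]
      simp [List.takeWhile_cons, hs, hns]
    · have hns : nsP ln[k] = true := by simp [nsP, hs]
      simp only [hs, if_neg, Bool.false_eq_true, not_false_eq_true]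
      rw [getNextSpaceP_eq ln (k + 1)]
      simp only [List.takeWhile_cons, hns, if_true, List.length_cons]
      omega
  · rename_i h
    rw [List.drop_eq_nil_of_le (by omega)]
    simp
termination_by ln.length - k

theorem lineWhileA_eq (ln : List Char) (k : Nat) (acc : List String) :
    lineWhileA ln k acc = acc ++ (tokRef (ln.drop k)).map String.mk := by
  unfold lineWhileA
  split
  · rename_i h
    set s := ln.drop k with hs
    have hk' : getNextCharP ln k = k + (s.takeWhile isSpaceP).length := getNextCharP_eq ln k
    have hdropk' : ln.drop (getNextCharP ln k) = s.dropWhile isSpaceP := by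
      rw [hk', ← List.drop_drop, ← hs, drop_length_takeWhile]
    have hk1 : getNextSpaceP ln (getNextCharP ln k)
        = getNextCharP ln k + ((s.dropWhile isSpaceP).takeWhile nsP).length := by
      rw [getNextSpaceP_eq, hdropk']
    have hslice : (ln.drop (getNextCharP ln k)).take
          (getNextSpaceP ln (getNextCharP ln k) - getNextCharP ln k)
        = (s.dropWhile isSpaceP).takeWhile nsP := by
      rw [hdropk', hk1, Nat.add_sub_cancel_left, take_length_takeWhile]
    have hdropk1 : ln.drop (getNextSpaceP ln (getNextCharP ln k))
        = (s.dropWhile isSpaceP).dropWhile nsP := by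
      rw [hk1, ← List.drop_drop, hdropk', drop_length_takeWhile]
    have hsne : s ≠ [] := by
      rw [hs]; simp only [ne_eq, List.drop_eq_nil_iff]; omega
    have htok : tokRef s
        = (s.dropWhile isSpaceP).takeWhile nsP :: tokRef ((s.dropWhile isSpaceP).dropWhile nsP) := by
      obtain ⟨a, t, hcons⟩ := List.exists_cons_of_ne_nil hsne
      rw [hcons, tokRef_cons, ← hcons]
    rw [lineWhileA_eq ln (getNextSpaceP ln (getNextCharP ln k)), hslice, hdropk1, htok]
    simp
  · rename_i h
    rw [List.drop_eq_nil_of_le (by omega), tokRef_nil]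
    simp
termination_by ln.length - k
decreasing_by have := lt_stepA ln k (by assumption); omega

-- the chunks produced by Source B's char pass, as (current open part, remaining parts)
def chunksP : List Char → Bool → (List Char × List (List Char))
  | [], _ => ([], [])
  | c :: cs, prev =>
    if isSpaceP c then
      if prev then chunksP cs true
      else ([], (chunksP cs true).1 :: (chunksP cs true).2)
    else
      (c :: (chunksP cs false).1, (chunksP cs false).2)

theorem contains_spaceCharsB (c : Char) : spaceCharsB.contains c = isSpaceP c := by
  by_cases h1 : c = ' ' <;> by_cases h2 : c = '\t' <;> by_cases h3 : c = '\x0c' <;>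
    by_cases h4 : c = '\x0b' <;> simp [spaceCharsB, isSpaceP, h1, h2, h3, h4]

theorem mem_spaceCharsB (c : Char) : (c ∈ spaceCharsB) ↔ isSpaceP c = true := by
  rw [← contains_spaceCharsB]
  exact List.contains_iff_mem.symm

theorem dropLast_getLastD (l : List (List Char)) (h : l ≠ []) :
    l.dropLast ++ [l.getLastD []] = l := by
  induction l with
  | nil => exact absurd rfl h
  | cons x t ih =>
    cases t with
    | nil => rfl
    | cons y u =>
      simp only [List.dropLast_cons₂, List.cons_append, List.getLastD_cons]
      congr 1
      have := ih (by simp)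
      simpa only [List.getLastD_cons] using this

theorem dropLast_getLastD_cons (l : List (List Char)) (h : l ≠ []) (xs : List (List Char)) :
    l.dropLast ++ l.getLastD [] :: xs = l ++ xs := by
  conv_rhs => rw [← dropLast_getLastD l h]
  simp

theorem foldB_eq (l : List Char) (parts : List (List Char)) (prev : Bool) (h : parts ≠ []) :
    (l.foldl lineStepB (parts, prev)).1
      = parts.dropLast ++ (parts.getLastD [] ++ (chunksP l prev).1) :: (chunksP l prev).2 := by
  induction l generalizing parts prev with
  | nil =>
    simp only [List.foldl_nil, chunksP, List.append_nil]
    exact (dropLast_getLastD parts h).symm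
  | cons c t ih =>
    rw [List.foldl_cons]
    by_cases hc : isSpaceP c = true
    · cases prev with
      | false =>
        have hstep : lineStepB (parts, false) c = (parts ++ [[]], true) := by
          simp [lineStepB, mem_spaceCharsB, hc]
        have hch : chunksP (c :: t) false = ([], (chunksP t true).1 :: (chunksP t true).2) := by
          simp [chunksP, hc]
        rw [hstep, ih (parts ++ [[]]) true (by simp), List.dropLast_concat,
          List.getLastD_concat, hch]
        simp only [List.nil_append, List.append_nil]
        exact (dropLast_getLastD_cons parts h _).symm
      | true =>
        have hstep : lineStepB (parts, true) c = (parts, true) := by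
          simp [lineStepB, mem_spaceCharsB, hc]
        have hch : chunksP (c :: t) true = chunksP t true := by
          simp [chunksP, hc]
        rw [hstep, ih parts true h, hch]
    · have hstep : lineStepB (parts, prev) c
          = (parts.dropLast ++ [parts.getLastD [] ++ [c]], false) := by
        simp [lineStepB, mem_spaceCharsB, hc]
      have hch : chunksP (c :: t) prev = (c :: (chunksP t false).1, (chunksP t false).2) := by
        cases prev <;> simp [chunksP, hc]
      rw [hstep, ih _ false (by simp), List.dropLast_concat, List.getLastD_concat, hch]
      simp

theorem chunksP_true (l : List Char) :
    chunksP l true = chunksP (l.dropWhile isSpaceP) false := by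
  induction l with
  | nil => rfl
  | cons c t ih =>
    by_cases hc : isSpaceP c = true
    · rw [List.dropWhile_cons_of_pos hc, ← ih]
      simp [chunksP, hc]
    · rw [List.dropWhile_cons_of_neg (by simp [hc])]
      simp [chunksP, hc]

theorem chunksP_false (l : List Char) :
    (chunksP l false).1 = l.takeWhile nsP ∧ (chunksP l false).2 = tokRef (l.dropWhile nsP) := by
  induction hn : l.length using Nat.strong_induction_on generalizing l with
  | _ n ih =>
  cases l with
  | nil => simp [chunksP, tokRef_nil]
  | cons c t =>
    by_cases hc : isSpaceP c = true
    · have hns : nsP c = false := by simp [nsP, hc]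
      have h1 : chunksP (c :: t) false = ([], (chunksP t true).1 :: (chunksP t true).2) := by
        simp [chunksP, hc]
      have hq : chunksP t true = chunksP (t.dropWhile isSpaceP) false := chunksP_true t
      have hlen : (t.dropWhile isSpaceP).length < n := by
        have := List.length_dropWhile_le isSpaceP t
        subst hn; simp only [List.length_cons]; omega
      obtain ⟨hm1, hm2⟩ := ih _ hlen (t.dropWhile isSpaceP) rfl
      constructor
      · rw [h1]; simp [List.takeWhile_cons, hns]
      · rw [h1]
        have hdropns : (c :: t).dropWhile nsP = c :: t := by
          simp [List.dropWhile_cons, hns]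
        have hdropsp : (c :: t).dropWhile isSpaceP = t.dropWhile isSpaceP := by
          simp [List.dropWhile_cons, hc]
        rw [hdropns, tokRef_cons, hdropsp, hq, hm1, hm2]
    · have hns : nsP c = true := by simp [nsP, hc]
      have h1 : chunksP (c :: t) false = (c :: (chunksP t false).1, (chunksP t false).2) := by
        simp [chunksP, hc]
      have hlen : t.length < n := by subst hn; simp
      obtain ⟨hm1, hm2⟩ := ih _ hlen t rfl
      constructor
      · rw [h1, hm1]; simp [List.takeWhile_cons, hns]
      · rw [h1, hm2]
        congr 1
        simp [List.dropWhile_cons, hns]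

theorem lineB_eq (l : List Char) : lineB l = (tokRef l).map String.mk := by
  obtain ⟨hm1, hm2⟩ := chunksP_false l
  have hfold := foldB_eq l [[]] false (by simp)
  unfold lineB
  rw [hfold]
  simp only [show ([[]] : List (List Char)).dropLast = [] from rfl,
    show ([[]] : List (List Char)).getLastD [] = [] from rfl, List.nil_append, hm1, hm2]
  cases l with
  | nil => simp [tokRef_nil]
  | cons c t =>
    by_cases hc : isSpaceP c = true
    · have hns : nsP c = false := by simp [nsP, hc]
      have htw : (c :: t).takeWhile nsP = [] := by simp [List.takeWhile_cons, hns]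
      have hdw : (c :: t).dropWhile nsP = c :: t := by simp [List.dropWhile_cons, hns]
      rw [htw, hdw]
      simp
    · have hns : nsP c = true := by simp [nsP, hc]
      have htw : (c :: t).takeWhile nsP = c :: t.takeWhile nsP := by
        simp [List.takeWhile_cons, hns]
      have hdw : (c :: t).dropWhile nsP = t.dropWhile nsP := by
        simp [List.dropWhile_cons, hns]
      have hdropsp : (c :: t).dropWhile isSpaceP = c :: t := by
        simp [List.dropWhile_cons, hc]
      rw [htw, hdw, tokRef_cons, hdropsp, htw, hdw]
      simp

theorem foldl_append_map (ls : List (List Char)) (acc : List (List String))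
    (f : List Char → List String) :
    ls.foldl (fun parser line => parser ++ [f line]) acc = acc ++ ls.map f := by
  induction ls generalizing acc with
  | nil => simp
  | cons x t ih => simp [ih]

-- ===== VERDICT (by name: the statement is the Claim_ definition above) =====
theorem newparserLotz_spec : Claim_equal_newparserLotz := by
  intro lotv _
  unfold Spec_newparserLotz newparserLotz newparserLotz_alt
  rw [foldl_append_map]
  simp only [List.nil_append]
  apply List.map_congr_left
  intro line _
  rw [lineB_eq, lineWhileA_eq]
  simp
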